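-- pv_equiv track=rewrite | github.com/kuznetsovvj/education | algorithms/codeforces/1807c.py | check
-- ===== SOURCE A (Python) =====
-- def check(wrd):
--     on, zr = set(), set()
--     for idx, item in enumerate(wrd):
--         if idx % 2 == 0:
--             if item in zr:
--                 return "NO"
--             on.add(item)
--         else:
--             if item in on:
--                 return "NO"
--             zr.add(item)
--     return "YES"
-- ===== SOURCE B (Python) =====
-- def check(wrd):
--     n = len(wrd)
--     for i in range(n):
--         for j in range(i + 1, n):
--             if wrd[i] == wrd[j] and (j - i) % 2 == 1:
--                 return "NO"
--     return "YES"
-- ===== Notes on version B (the rewrite author's own statement) =====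
-- stated objective: alternative
-- what changed: Replaces the single enumerate pass maintaining two parity sets by a brute-force scan over all index pairs i<j, reporting a conflict when equal characters sit at odd distance; no sets are maintained at all.
import Mathlib
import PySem

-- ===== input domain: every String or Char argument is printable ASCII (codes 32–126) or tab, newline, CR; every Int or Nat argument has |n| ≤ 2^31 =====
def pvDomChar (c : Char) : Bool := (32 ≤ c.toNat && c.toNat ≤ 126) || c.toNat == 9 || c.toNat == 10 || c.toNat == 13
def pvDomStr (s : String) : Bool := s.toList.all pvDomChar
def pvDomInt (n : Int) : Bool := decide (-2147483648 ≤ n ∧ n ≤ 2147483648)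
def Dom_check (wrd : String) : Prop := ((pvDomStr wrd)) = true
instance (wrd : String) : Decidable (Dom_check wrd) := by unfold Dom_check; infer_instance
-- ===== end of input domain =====

-- B drops A's two parity sets and instead brute-forces all index pairs i < j,
-- answering "NO" when equal characters sit at odd distance: a different
-- (quadratic, set-free) algorithm of the same exact behaviour.

-- ===== PORT A =====
-- the 'for idx, item in enumerate(wrd)' loop with its early returns
def checkLoop (pairs : List (Int × Char)) (on zr : PySem.Set Char) : String :=
  match pairs with
  | [] => "YES"
  | (idx, item) :: rest =>
    if idx % 2 == 0 then
      if PySem.Set.contains zr item then "NO"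
      else checkLoop rest (PySem.Set.add on item) zr
    else
      if PySem.Set.contains on item then "NO"
      else checkLoop rest on (PySem.Set.add zr item)

def check (wrd : String) : String :=
  checkLoop (PySem.List.enumerate wrd.toList 0) PySem.Set.empty PySem.Set.empty

-- ===== PORT B =====
-- the inner 'for j in range(i + 1, n)' loop; some "NO" = early return
def bInner (cs : List Char) (i : Int) : List Int → Option String
  | [] => none
  | j :: rest =>
      if PySem.List.pyGet? cs i == PySem.List.pyGet? cs j && (j - i) % 2 == 1 then
        some "NO"
      else bInner cs i rest

-- the outer 'for i in range(n)' loop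
def bOuter (cs : List Char) : List Int → String
  | [] => "YES"
  | i :: rest =>
      match bInner cs i (PySem.List.pyRange (i + 1) cs.length 1) with
      | some s => s
      | none => bOuter cs rest

def check_alt (wrd : String) : String :=
  bOuter wrd.toList (PySem.List.pyRange 0 wrd.toList.length 1)

-- ===== PRECONDITION & SPEC =====
def Spec_check (wrd : String) (out : String) : Prop := out = check_alt wrd
instance (wrd : String) (out : String) : Decidable (Spec_check wrd out) := by unfold Spec_check; infer_instance

-- ===== CLAIM (what is proved, stated in full; the proofs are below) =====
def Claim_equal_check : Prop := ∀ (wrd : String), Dom_check wrd → Spec_check wrd (check wrd)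

-- ===== LEMMAS AND PROOFS =====

-- characters at even / odd positions
def evens : List Char → List Char
  | [] => []
  | [a] => [a]
  | a :: _ :: t => a :: evens t

def odds (l : List Char) : List Char := evens l.tail

lemma evens_cons (a : Char) (rest : List Char) : evens (a :: rest) = a :: odds rest := by
  cases rest <;> rfl

lemma odds_cons (a : Char) (rest : List Char) : odds (a :: rest) = evens rest := rfl

-- the loop-invariant condition of A's pass
def conflictFree (cs : List Char) (on zr : List Char) : Bool :=
  ((evens cs).all (fun c => !(odds cs).contains c)) &&
  ((evens cs).all (fun c => !zr.contains c)) &&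
  ((odds cs).all (fun c => !on.contains c))

lemma set_contains_true {s : PySem.Set Char} {x : Char} :
    PySem.Set.contains s x = true ↔ x ∈ s := by
  simp [PySem.Set.contains_eq_listContains]

lemma mem_and_split (X : List Char) (p : Char → Prop) (a : Char) :
    (∀ c ∈ X, p c ∧ ¬ c = a) ↔ ((∀ c ∈ X, p c) ∧ a ∉ X) := by
  constructor
  · exact fun h => ⟨fun c hc => (h c hc).1, fun ha => (h a ha).2 rfl⟩
  · rintro ⟨h1, h2⟩ c hc
    exact ⟨h1 c hc, fun he => h2 (he ▸ hc)⟩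

lemma conflictFree_iff (cs on zr : List Char) :
    conflictFree cs on zr = true ↔
      ((∀ c ∈ evens cs, c ∉ odds cs) ∧ (∀ c ∈ evens cs, c ∉ zr) ∧ (∀ c ∈ odds cs, c ∉ on)) := by
  simp [conflictFree]
  tauto

lemma conflictFree_cons_iff (a : Char) (rest : List Char) (on zr : List Char) :
    conflictFree (a :: rest) on zr = true ↔
      (a ∉ zr ∧ conflictFree rest zr (PySem.Set.add on a) = true) := by
  simp only [conflictFree_iff, evens_cons, odds_cons, List.forall_mem_cons,
    PySem.Set.mem_add, not_or]
  rw [mem_and_split (evens rest) (fun c => c ∉ on) a]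
  tauto

lemma checkLoop_enum (cs : List Char) : ∀ (n : Int) (on zr : PySem.Set Char),
    checkLoop (PySem.List.enumerate cs n) on zr =
      (if n % 2 == 0 then (if conflictFree cs on zr then "YES" else "NO")
       else (if conflictFree cs zr on then "YES" else "NO")) := by
  induction cs with
  | nil =>
    intro n on zr
    simp [PySem.List.enumerate_nil, checkLoop, conflictFree, evens, odds]
  | cons a rest ih =>
    intro n on zr
    rw [PySem.List.enumerate_cons]
    by_cases h : n % 2 = 0
    · have h1 : ¬ (n + 1) % 2 = 0 := by omega
      rw [checkLoop, ih (n + 1) (PySem.Set.add on a) zr]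
      simp only [beq_iff_eq]
      rw [if_pos h, if_neg h1, if_pos h]
      by_cases hz : a ∈ zr
      · rw [if_pos (set_contains_true.mpr hz),
            if_neg (fun hc => ((conflictFree_cons_iff a rest on zr).mp hc).1 hz)]
      · rw [if_neg (fun hb => hz (set_contains_true.mp hb))]
        by_cases hcf : conflictFree rest zr (PySem.Set.add on a) = true
        · rw [if_pos hcf, if_pos ((conflictFree_cons_iff a rest on zr).mpr ⟨hz, hcf⟩)]
        · rw [if_neg hcf,
              if_neg (fun hc => hcf ((conflictFree_cons_iff a rest on zr).mp hc).2)]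
    · have h1 : (n + 1) % 2 = 0 := by omega
      rw [checkLoop, ih (n + 1) on (PySem.Set.add zr a)]
      simp only [beq_iff_eq]
      rw [if_neg h, if_pos h1, if_neg h]
      by_cases hz : a ∈ on
      · rw [if_pos (set_contains_true.mpr hz),
            if_neg (fun hc => ((conflictFree_cons_iff a rest zr on).mp hc).1 hz)]
      · rw [if_neg (fun hb => hz (set_contains_true.mp hb))]
        by_cases hcf : conflictFree rest on (PySem.Set.add zr a) = true
        · rw [if_pos hcf, if_pos ((conflictFree_cons_iff a rest zr on).mpr ⟨hz, hcf⟩)]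
        · rw [if_neg hcf,
              if_neg (fun hc => hcf ((conflictFree_cons_iff a rest zr on).mp hc).2)]

-- membership in evens/odds = a character at an even/odd index
lemma mem_evens_odds (l : List Char) (c : Char) :
    (c ∈ evens l ↔ ∃ k : ℕ, l[2*k]? = some c) ∧
    (c ∈ odds l ↔ ∃ k : ℕ, l[2*k+1]? = some c) := by
  induction l using evens.induct with
  | case1 => simp [evens, odds]
  | case2 a =>
    have h0 : ([a] : List Char)[2*0]? = some a := rfl
    have hn : ∀ k : ℕ, k ≠ 0 → ([a] : List Char)[2*k]? = none := by
      intro k hk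
      apply List.getElem?_eq_none
      simp; omega
    have hodd : ∀ k : ℕ, ([a] : List Char)[2*k+1]? = none := by
      intro k
      apply List.getElem?_eq_none
      simp
    constructor
    · simp only [evens, List.mem_singleton]
      constructor
      · rintro rfl; exact ⟨0, h0⟩
      · rintro ⟨k, hk⟩
        by_cases hk0 : k = 0
        · subst hk0
          rw [h0] at hk
          exact (Option.some.inj hk).symm
        · rw [hn k hk0] at hk
          simp at hk
    · constructor
      · intro h
        simp [odds, evens] at h
      · rintro ⟨k, hk⟩
        rw [hodd k] at hk
        simp at hk
  | case3 a b t ih =>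
    have hstep2 : ∀ k : ℕ, ((a :: b :: t : List Char)[2*(k+1)]?) = t[2*k]? := by
      intro k
      have h2 : 2 * (k+1) = (2*k) + 1 + 1 := by omega
      rw [h2, List.getElem?_cons_succ, List.getElem?_cons_succ]
    have hstep2' : ∀ k : ℕ, ((a :: b :: t : List Char)[2*(k+1)+1]?) = t[2*k+1]? := by
      intro k
      have h2 : 2 * (k+1) + 1 = (2*k+1) + 1 + 1 := by omega
      rw [h2, List.getElem?_cons_succ, List.getElem?_cons_succ]
    constructor
    · show c ∈ a :: evens t ↔ _
      rw [List.mem_cons, ih.1]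
      constructor
      · rintro (rfl | ⟨k, hk⟩)
        · exact ⟨0, rfl⟩
        · exact ⟨k + 1, by rw [hstep2 k]; exact hk⟩
      · rintro ⟨k, hk⟩
        rcases k with _ | k
        · left; exact (Option.some.inj hk).symm
        · right; exact ⟨k, by rw [hstep2 k] at hk; exact hk⟩
    · rw [odds_cons, evens_cons, List.mem_cons, ih.2]
      constructor
      · rintro (rfl | ⟨k, hk⟩)
        · exact ⟨0, rfl⟩
        · exact ⟨k + 1, by rw [hstep2' k]; exact hk⟩
      · rintro ⟨k, hk⟩
        rcases k with _ | k
        · left; exact (Option.some.inj hk).symm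
        · right; exact ⟨k, by rw [hstep2' k] at hk; exact hk⟩

-- abstract "conflict" proposition both programs decide
def HasConflict (cs : List Char) : Prop :=
  ∃ i j : ℕ, i < j ∧ j < cs.length ∧ cs[i]? = cs[j]? ∧ (j - i) % 2 = 1

lemma evens_odds_iff_conflict (cs : List Char) :
    (∃ c, c ∈ evens cs ∧ c ∈ odds cs) ↔ HasConflict cs := by
  constructor
  · rintro ⟨c, hce, hco⟩
    obtain ⟨k, hk⟩ := (mem_evens_odds cs c).1.mp hce
    obtain ⟨m, hm⟩ := (mem_evens_odds cs c).2.mp hco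
    have hkl : 2*k < cs.length := by
      by_contra h
      rw [List.getElem?_eq_none (by omega)] at hk
      simp at hk
    have hml : 2*m+1 < cs.length := by
      by_contra h
      rw [List.getElem?_eq_none (by omega)] at hm
      simp at hm
    by_cases hlt : 2*k < 2*m+1
    · exact ⟨2*k, 2*m+1, hlt, hml, by rw [hk, hm], by omega⟩
    · refine ⟨2*m+1, 2*k, by omega, hkl, by rw [hk, hm], by omega⟩
  · rintro ⟨i, j, hij, hjl, heq, hodd⟩
    obtain ⟨c, hc⟩ : ∃ c, cs[i]? = some c :=
      ⟨cs[i]'(by omega), List.getElem?_eq_getElem (by omega)⟩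
    have hcj : cs[j]? = some c := heq ▸ hc
    refine ⟨c, ?_, ?_⟩
    · -- one of i, j is even
      by_cases hi : i % 2 = 0
      · exact (mem_evens_odds cs c).1.mpr ⟨i / 2, by rw [show 2*(i/2) = i by omega]; exact hc⟩
      · have hj : j % 2 = 0 := by omega
        exact (mem_evens_odds cs c).1.mpr ⟨j / 2, by rw [show 2*(j/2) = j by omega]; exact hcj⟩
    · by_cases hi : i % 2 = 1
      · exact (mem_evens_odds cs c).2.mpr ⟨i / 2, by rw [show 2*(i/2)+1 = i by omega]; exact hc⟩
      · have hj : j % 2 = 1 := by omega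
        exact (mem_evens_odds cs c).2.mpr ⟨j / 2, by rw [show 2*(j/2)+1 = j by omega]; exact hcj⟩

-- B's inner loop finds nothing iff no in-range j conflicts with i
lemma bInner_eq_none (cs : List Char) (i : Int) (js : List Int) :
    bInner cs i js = none ↔
      ∀ j ∈ js, ¬(PySem.List.pyGet? cs i = PySem.List.pyGet? cs j ∧ (j - i) % 2 = 1) := by
  induction js with
  | nil => simp [bInner]
  | cons j rest ih =>
    rw [bInner]
    by_cases h : PySem.List.pyGet? cs i = PySem.List.pyGet? cs j ∧ (j - i) % 2 = 1
    · simp [h.1, h.2]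
    · have hb : (PySem.List.pyGet? cs i == PySem.List.pyGet? cs j && (j - i) % 2 == 1) = false := by
        rcases not_and_or.mp h with h1 | h1 <;> simp_all
      rw [hb]
      simp only [Bool.false_eq_true, if_false, ih, List.forall_mem_cons]
      tauto

lemma bInner_values (cs : List Char) (i : Int) (js : List Int) :
    bInner cs i js = none ∨ bInner cs i js = some "NO" := by
  induction js with
  | nil => left; rfl
  | cons j rest ih =>
    rw [bInner]
    split
    · right; rfl
    · exact ih

lemma bOuter_yes_iff (cs : List Char) (is : List Int) :
    bOuter cs is = "YES" ↔
      ∀ i ∈ is, bInner cs i (PySem.List.pyRange (i + 1) cs.length 1) = none := by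
  induction is with
  | nil => simp [bOuter]
  | cons i rest ih =>
    rw [bOuter, List.forall_mem_cons]
    rcases bInner_values cs i (PySem.List.pyRange (i + 1) cs.length 1) with h | h <;>
      rw [h] <;> simp [ih]

lemma bOuter_values (cs : List Char) (is : List Int) :
    bOuter cs is = "YES" ∨ bOuter cs is = "NO" := by
  induction is with
  | nil => left; rfl
  | cons i rest ih =>
    rw [bOuter]
    rcases bInner_values cs i (PySem.List.pyRange (i + 1) cs.length 1) with h | h <;> rw [h]
    · exact ih
    · right; rfl

lemma check_alt_yes_iff (cs : List Char) :
    bOuter cs (PySem.List.pyRange 0 cs.length 1) = "YES" ↔ ¬ HasConflict cs := by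
  rw [bOuter_yes_iff]
  constructor
  · intro h hconf
    obtain ⟨i, j, hij, hjl, heq, hodd⟩ := hconf
    have hi : (i : Int) ∈ PySem.List.pyRange 0 cs.length 1 := by
      rw [PySem.List.mem_pyRange_one]; omega
    have hj : (j : Int) ∈ PySem.List.pyRange ((i : Int) + 1) cs.length 1 := by
      rw [PySem.List.mem_pyRange_one]; omega
    refine absurd ?_ ((bInner_eq_none cs i _).mp (h i hi) j hj)
    refine ⟨?_, ?_⟩
    · rw [PySem.List.pyGet?_natCast, PySem.List.pyGet?_natCast]; exact heq
    · omega
  · intro h i hi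
    rw [bInner_eq_none]
    rintro j hj ⟨heq, hodd⟩
    rw [PySem.List.mem_pyRange_one] at hi hj
    apply h
    refine ⟨i.toNat, j.toNat, by omega, by omega, ?_, ?_⟩
    · rw [← PySem.List.pyGet?_of_nonneg cs (by omega : (0:Int) ≤ i),
          ← PySem.List.pyGet?_of_nonneg cs (by omega : (0:Int) ≤ j)]
      exact heq
    · omega

-- ===== VERDICT (by name: the statement is the Claim_ definition above) =====
theorem check_spec : Claim_equal_check := by
  unfold Claim_equal_check
  intro wrd _
  unfold Spec_check check check_alt
  rw [checkLoop_enum]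
  have hb : ((0:ℤ) % 2 == 0) = true := by decide
  rw [hb, if_pos rfl]
  have key2 : conflictFree wrd.toList PySem.Set.empty PySem.Set.empty = true ↔
      (∀ c ∈ evens wrd.toList, c ∉ odds wrd.toList) := by
    rw [conflictFree_iff]
    simp [PySem.Set.empty]
  by_cases h : HasConflict wrd.toList
  · have h1 : ¬ conflictFree wrd.toList PySem.Set.empty PySem.Set.empty = true := by
      rw [key2]
      intro hall
      obtain ⟨c, hc1, hc2⟩ := (evens_odds_iff_conflict wrd.toList).mpr h
      exact hall c hc1 hc2
    rw [if_neg h1]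
    rcases bOuter_values wrd.toList (PySem.List.pyRange 0 wrd.toList.length 1) with hv | hv
    · exact absurd ((check_alt_yes_iff wrd.toList).mp hv) (not_not.mpr h)
    · exact hv.symm
  · have h1 : conflictFree wrd.toList PySem.Set.empty PySem.Set.empty = true := by
      rw [key2]
      intro c hc1 hc2
      exact h ((evens_odds_iff_conflict wrd.toList).mp ⟨c, hc1, hc2⟩)
    rw [if_pos h1]
    exact ((check_alt_yes_iff wrd.toList).mpr h).symm
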